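-- pv_equiv track=rewrite | github.com/skrimix/NyarchAssistant | src/extra.py | extract_expressions
-- ===== SOURCE A (Python) =====
-- def extract_expressions(text, expressions_list):
--     expressions = []
--     current_expression = None
--     current_text = ""
--
--     tokens = text.split()
--     i = 0
--     while i < len(tokens):
--         if tokens[i].startswith("(") and tokens[i].endswith(")"):
--             expression = tokens[i][1:-1]
--             if expression in expressions_list:
--                 if current_text.strip():
--                     expressions.append({"expression": current_expression, "text": current_text.strip()})
--                     current_text = ""
--                 current_expression = expression
--             else:
--                 current_text += tokens[i] + " "
--         else:
--             if current_expression is None: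
--                 current_text += tokens[i] + " "
--             else:
--                 current_text += tokens[i] + " "
--         i += 1
--
--     if current_text.strip():
--         if current_expression:
--             expressions.append({"expression": current_expression, "text": current_text.strip()})
--         else:
--             expressions.append({"expression": None, "text": current_text.strip()})
--
--     return expressions
-- ===== SOURCE B (Python) =====
-- def extract_expressions(text, expressions_list):
--     # Segment-at-a-time: repeatedly search for the next marker token and emit
--     # the whole segment before it by slicing + joining; no character buffer.
--     def is_marker(t):
--         return t.startswith("(") and t.endswith(")") and t[1:-1] in expressions_list
--
--     out = []
--     label = None
--     tokens = text.split()
--     while True: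
--         j = next((k for k, t in enumerate(tokens) if is_marker(t)), None)
--         if j is None:
--             if tokens:
--                 out.append({"expression": label or None, "text": " ".join(tokens)})
--             return out
--         if j:
--             out.append({"expression": label, "text": " ".join(tokens[:j])})
--         label, tokens = tokens[j][1:-1], tokens[j + 1:]
-- ===== Notes on version B (the rewrite author's own statement) =====
-- stated objective: alternative
-- what changed: A streams token by token through a mutable string accumulator with inline strip-and-flush at each marker; B keeps no character buffer at all: it repeatedly searches the remaining token list for the next recognized marker and emits the whole segment before it at once by slicing and joining, then continues on the suffix.
import Mathlib
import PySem

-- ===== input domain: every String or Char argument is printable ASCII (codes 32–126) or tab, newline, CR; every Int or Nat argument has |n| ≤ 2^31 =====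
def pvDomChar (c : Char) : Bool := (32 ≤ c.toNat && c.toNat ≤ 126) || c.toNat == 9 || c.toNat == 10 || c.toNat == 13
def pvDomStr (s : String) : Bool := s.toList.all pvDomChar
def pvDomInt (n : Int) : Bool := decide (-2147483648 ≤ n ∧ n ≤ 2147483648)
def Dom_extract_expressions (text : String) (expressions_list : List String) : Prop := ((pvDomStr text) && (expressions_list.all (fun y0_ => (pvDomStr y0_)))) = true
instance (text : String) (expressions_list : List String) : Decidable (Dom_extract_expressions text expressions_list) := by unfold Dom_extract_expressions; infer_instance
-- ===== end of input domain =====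

-- B replaces A's token-by-token scan with a string accumulator by a segment-at-a-time loop:
-- search the remaining tokens for the next recognized marker, emit the whole segment before it
-- by slicing + joining, continue on the suffix; objective: alternative decomposition, not faster.

-- ===== PORT A =====
-- A's while loop over tokens; state = (expressions, current_expression, current_text as chars)
def pvLoopA (el : List String) :
    List String →
    List (List (String × Option String)) × Option String × List Char →
    List (List (String × Option String)) × Option String × List Char
  | [], st => st
  | t :: rest, (exprs, curE, curT) =>
    if PySem.Str.startswith t "(" && PySem.Str.endswith t ")" then
      -- expression = tokens[i][1:-1]
      let e := String.ofList (PySem.List.slice t.toList (some 1) (some (-1)))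
      if e ∈ el then
        if PySem.Chars.strip curT ≠ [] then
          pvLoopA el rest
            (exprs ++ [[("expression", curE), ("text", some (String.ofList (PySem.Chars.strip curT)))]],
             some e, [])
        else
          pvLoopA el rest (exprs, some e, curT)
      else
        pvLoopA el rest (exprs, curE, curT ++ t.toList ++ [' '])
    else
      -- A's two branches here have identical bodies; kept as in the source
      if curE = none then
        pvLoopA el rest (exprs, curE, curT ++ t.toList ++ [' '])
      else
        pvLoopA el rest (exprs, curE, curT ++ t.toList ++ [' '])

def extract_expressions (text : String) (expressions_list : List String) :
    List (List (String × Option String)) :=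
  let st := pvLoopA expressions_list (PySem.Str.split₀ text) ([], none, [])
  let exprs := st.1
  let curE := st.2.1
  let curT := st.2.2
  if PySem.Chars.strip curT ≠ [] then
    if curE ≠ none ∧ curE ≠ some "" then   -- Python truthiness: `if current_expression:`
      exprs ++ [[("expression", curE), ("text", some (String.ofList (PySem.Chars.strip curT)))]]
    else
      exprs ++ [[("expression", none), ("text", some (String.ofList (PySem.Chars.strip curT)))]]
  else exprs

-- ===== PORT B =====
-- is_marker(t) of Source B
def pvIsMarker (el : List String) (t : String) : Bool :=
  PySem.Str.startswith t "(" && PySem.Str.endswith t ")" &&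
    decide ((String.ofList (PySem.List.slice t.toList (some 1) (some (-1)))) ∈ el)

-- Source B's `while True` loop; state = (out, label, tokens); fuel is only a totality device
-- (each iteration drops ≥ 1 token, so fuel = tokens.length + 1 is never exhausted).
-- `tokens[:j]` = take j and `tokens[j+1:]` = drop (j+1) are exact since 0 ≤ j.
def pvSegF (el : List String) :
    Nat → List (List (String × Option String)) → Option String → List String →
    List (List (String × Option String))
  | 0, out, _, _ => out
  | fuel+1, out, label, tokens =>
    match tokens.findIdx? (pvIsMarker el) with
    | none =>
      if !tokens.isEmpty then
        out ++ [[("expression", if label = none ∨ label = some "" then none else label),  -- `label or None`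
                 ("text", some (PySem.Str.join " " tokens))]]
      else out
    | some j =>
      pvSegF el fuel
        (if j ≠ 0 then
           out ++ [[("expression", label), ("text", some (PySem.Str.join " " (tokens.take j)))]]
         else out)
        (some (String.ofList (PySem.List.slice (tokens.getD j "").toList (some 1) (some (-1)))))
        (tokens.drop (j+1))

def extract_expressions_alt (text : String) (expressions_list : List String) :
    List (List (String × Option String)) :=
  let tokens := PySem.Str.split₀ text
  pvSegF expressions_list (tokens.length + 1) [] none tokens

-- ===== PRECONDITION & SPEC =====
def Spec_extract_expressions (text : String) (expressions_list : List String) (out : List (List (String × Option String))) : Prop := out = extract_expressions_alt text expressions_list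
instance (text : String) (expressions_list : List String) (out : List (List (String × Option String))) : Decidable (Spec_extract_expressions text expressions_list out) := by unfold Spec_extract_expressions; infer_instance

-- ===== CLAIM (what is proved, stated in full; the proofs are below) =====
def Claim_equal_extract_expressions : Prop := ∀ (text : String) (expressions_list : List String), Dom_extract_expressions text expressions_list → Spec_extract_expressions text expressions_list (extract_expressions text expressions_list)

-- ===== LEMMAS AND PROOFS =====

-- a well-formed token of str.split(): nonempty, no whitespace characters
def Ptok (cs : List Char) : Prop := cs ≠ [] ∧ ∀ c ∈ cs, PySem.Chars.isspace c = false

lemma split0_go_wf : ∀ (s cur : List Char) (acc : List (List Char)),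
    (∀ c ∈ cur, PySem.Chars.isspace c = false) → (∀ t ∈ acc, Ptok t) →
    ∀ t ∈ PySem.Chars.split₀.go s cur acc, Ptok t := by
  intro s
  induction s with
  | nil =>
    intro cur acc hcur hacc t ht
    simp only [PySem.Chars.split₀.go] at ht
    split at ht
    · exact hacc t (by simpa using ht)
    · rcases (by simpa using ht : t ∈ acc ∨ t = cur.reverse) with h | h
      · exact hacc t h
      · subst h
        rename_i hne
        refine ⟨by simpa [List.isEmpty_iff] using hne, ?_⟩
        intro c hc; exact hcur c (by simpa using hc)
  | cons c rest ih =>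
    intro cur acc hcur hacc t ht
    simp only [PySem.Chars.split₀.go] at ht
    split at ht
    · split at ht
      · exact ih [] acc (by simp) hacc t ht
      · refine ih [] _ (by simp) ?_ t ht
        intro u hu
        rcases (by simpa using hu : u = cur.reverse ∨ u ∈ acc) with h | h
        · subst h
          rename_i hsp hne
          refine ⟨by simpa [List.isEmpty_iff] using hne, ?_⟩
          intro d hd
          exact hcur d (by simpa using hd)
        · exact hacc u h
    · refine ih (c :: cur) acc ?_ hacc t ht
      intro d hd
      rcases (by simpa using hd : d = c ∨ d ∈ cur) with h | h
      · subst h; rename_i hsp; simpa using hsp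
      · exact hcur d h

lemma split0_wf (s : List Char) : ∀ t ∈ PySem.Chars.split₀ s, Ptok t := by
  intro t ht
  exact split0_go_wf s [] [] (by simp) (by simp) t (by simpa [PySem.Chars.split₀] using ht)

def joinT (ts : List String) : List Char := (ts.map (fun t => t.toList ++ [' '])).flatten
def interc (ts : List String) : List Char := PySem.Chars.join [' '] (ts.map String.toList)

lemma rstrip_append_of_ne (x y : List Char) (h : PySem.Chars.rstrip y ≠ []) :
    PySem.Chars.rstrip (x ++ y) = x ++ PySem.Chars.rstrip y := by
  have h' : List.dropWhile PySem.Chars.isspace y.reverse ≠ [] := by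
    simpa [PySem.Chars.rstrip] using h
  simp [PySem.Chars.rstrip, List.reverse_append, List.dropWhile_append, List.isEmpty_iff, h']

lemma rstrip_tok (a : List Char) (ha : Ptok a) :
    PySem.Chars.rstrip (a ++ [' ']) = a := by
  rcases ha with ⟨hne, hsp⟩
  obtain ⟨c, r, hcr⟩ : ∃ c r, a.reverse = c :: r := by
    rcases List.exists_cons_of_ne_nil (by simpa using (List.reverse_eq_nil_iff.not.mpr hne) : a.reverse ≠ []) with ⟨c, r, h⟩
    exact ⟨c, r, h⟩
  have hc : PySem.Chars.isspace c = false := by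
    apply hsp
    have : c ∈ a.reverse := by simp [hcr]
    simpa using this
  simp [PySem.Chars.rstrip, List.reverse_append, hcr, hc,
    show PySem.Chars.isspace ' ' = true from by decide]
  have := congrArg List.reverse hcr
  simpa using this.symm

lemma interc_cons_cons (a b : String) (ts : List String) :
    interc (a :: b :: ts) = a.toList ++ ' ' :: interc (b :: ts) := by
  unfold interc
  rw [List.map_cons, List.map_cons, PySem.Chars.join_cons_cons]
  simp

lemma interc_ne_nil (ts : List String) (h : ts ≠ []) (hp : ∀ t ∈ ts, Ptok t.toList) :
    interc ts ≠ [] := by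
  cases ts with
  | nil => exact absurd rfl h
  | cons a ts =>
    have ha := (hp a (by simp)).1
    cases ts with
    | nil =>
      intro hcon
      apply ha
      unfold interc at hcon
      rw [List.map_cons, List.map_nil, PySem.Chars.join_singleton] at hcon
      exact hcon
    | cons b ts' =>
      rw [interc_cons_cons]
      simp [ha]

lemma rstrip_joinT : ∀ (ts : List String), (∀ t ∈ ts, Ptok t.toList) →
    PySem.Chars.rstrip (joinT ts) = interc ts := by
  intro ts
  induction ts with
  | nil => intro _; simp [joinT, interc, PySem.Chars.rstrip, pysem]
  | cons a ts ih =>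
    intro hp
    have ha := hp a (by simp)
    match ts, ih with
    | [], _ =>
      have : joinT [a] = a.toList ++ [' '] := by simp [joinT]
      rw [this, rstrip_tok a.toList ha]
      unfold interc
      rw [List.map_cons, List.map_nil, PySem.Chars.join_singleton]
    | b :: ts', ih =>
      have hp' : ∀ t ∈ b :: ts', Ptok t.toList := fun t ht => hp t (by simp [ht])
      have hrec := ih hp'
      have h1 : joinT (a :: b :: ts') = (a.toList ++ [' ']) ++ joinT (b :: ts') := by
        simp [joinT]
      have hne : PySem.Chars.rstrip (joinT (b :: ts')) ≠ [] := by
        rw [hrec]; exact interc_ne_nil _ (by simp) hp'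
      rw [h1, rstrip_append_of_ne _ _ hne, hrec, interc_cons_cons]
      simp

lemma lstrip_joinT (ts : List String) (hp : ∀ t ∈ ts, Ptok t.toList) :
    PySem.Chars.lstrip (joinT ts) = joinT ts := by
  cases ts with
  | nil => simp [joinT, PySem.Chars.lstrip]
  | cons a ts =>
    have ha := hp a (by simp)
    obtain ⟨c, r, hcr⟩ := List.exists_cons_of_ne_nil ha.1
    have hc : PySem.Chars.isspace c = false := ha.2 c (by simp [hcr])
    simp [joinT, hcr, PySem.Chars.lstrip, hc]

lemma strip_joinT (ts : List String) (hp : ∀ t ∈ ts, Ptok t.toList) :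
    PySem.Chars.strip (joinT ts) = interc ts := by
  unfold PySem.Chars.strip
  rw [lstrip_joinT ts hp, rstrip_joinT ts hp]

lemma joinT_append (ts : List String) (t : String) :
    joinT (ts ++ [t]) = joinT ts ++ (t.toList ++ [' ']) := by
  simp [joinT]

lemma joinT_nil : joinT [] = [] := rfl

lemma str_join_eq (ts : List String) : PySem.Str.join " " ts = String.ofList (interc ts) := by
  unfold PySem.Str.join interc
  rfl

lemma strip_nil : PySem.Chars.strip ([] : List Char) = [] := by
  simp [PySem.Chars.strip, PySem.Chars.lstrip, PySem.Chars.rstrip]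

-- proof-only helper: A's closing flush, as a function of the final loop state
def pvFlush (st : List (List (String × Option String)) × Option String × List Char) :
    List (List (String × Option String)) :=
  if PySem.Chars.strip st.2.2 ≠ [] then
    if st.2.1 ≠ none ∧ st.2.1 ≠ some "" then
      st.1 ++ [[("expression", st.2.1), ("text", some (String.ofList (PySem.Chars.strip st.2.2)))]]
    else
      st.1 ++ [[("expression", none), ("text", some (String.ofList (PySem.Chars.strip st.2.2)))]]
  else st.1

-- proof-only helper: the accumulator form of Source B's segment loop
def pvSegAcc (el : List String) :
    List String → Option String → List String → List (List (String × Option String))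
  | [], label, acc =>
    if acc ≠ [] then
      [[("expression", if label = none ∨ label = some "" then none else label),
        ("text", some (PySem.Str.join " " acc))]]
    else []
  | t :: r, label, acc =>
    if pvIsMarker el t then
      (if acc ≠ [] then
         [[("expression", label), ("text", some (PySem.Str.join " " acc))]]
       else []) ++
      pvSegAcc el r (some (String.ofList (PySem.List.slice t.toList (some 1) (some (-1))))) []
    else pvSegAcc el r label (acc ++ [t])

lemma findIdx?_append_marker {p : String → Bool} (acc : List String) (t : String)
    (r : List String) (hacc : ∀ u ∈ acc, p u = false) (ht : p t = true) :
    (acc ++ t :: r).findIdx? p = some acc.length := by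
  induction acc with
  | nil => simp [List.findIdx?_cons, ht]
  | cons a acc ih =>
    have ha : p a = false := hacc a (by simp)
    have ih' := ih (fun u hu => hacc u (by simp [hu]))
    simp [List.findIdx?_cons, ha, ih']

lemma findIdx?_none_of_all {p : String → Bool} (l : List String)
    (h : ∀ u ∈ l, p u = false) : l.findIdx? p = none := by
  induction l with
  | nil => simp
  | cons a l ih =>
    have := h a (by simp)
    simp [List.findIdx?_cons, this, ih (fun u hu => h u (by simp [hu]))]

-- B's search-and-slice loop equals the accumulator form
lemma segF_eq_segAcc (el : List String) :
    ∀ (rest : List String) (acc : List String), (∀ u ∈ acc, pvIsMarker el u = false) →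
    ∀ (fuel : Nat), (acc ++ rest).length + 1 ≤ fuel →
    ∀ (out : List (List (String × Option String))) (label : Option String),
    pvSegF el fuel out label (acc ++ rest) = out ++ pvSegAcc el rest label acc := by
  intro rest
  induction rest with
  | nil =>
    intro acc hacc fuel hfuel out label
    obtain ⟨f, rfl⟩ : ∃ f, fuel = f + 1 := ⟨fuel - 1, by omega⟩
    have hnone : (acc ++ ([] : List String)).findIdx? (pvIsMarker el) = none := by
      simpa using findIdx?_none_of_all acc hacc
    simp only [pvSegF, hnone, pvSegAcc]
    by_cases h : acc = []
    · simp [h]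
    · simp [h]
  | cons t r ih =>
    intro acc hacc fuel hfuel out label
    have hlen : (acc ++ t :: r).length = acc.length + r.length + 1 := by
      simp only [List.length_append, List.length_cons]
      omega
    by_cases hm : pvIsMarker el t = true
    · obtain ⟨f, rfl⟩ : ∃ f, fuel = f + 1 := ⟨fuel - 1, by omega⟩
      have hsome := findIdx?_append_marker acc t r hacc hm
      have hget : (acc ++ t :: r).getD acc.length "" = t := by
        simp [List.getD]
      have htake : (acc ++ t :: r).take acc.length = acc := by
        simp
      have hdrop : (acc ++ t :: r).drop (acc.length + 1) = r := by
        have : acc.length + 1 = (acc ++ [t]).length := by simp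
        rw [this, show acc ++ t :: r = (acc ++ [t]) ++ r by simp, List.drop_left]
      simp only [pvSegF, hsome, hget, htake, hdrop]
      have hrec := ih ([] : List String) (by simp) f
        (by simp only [List.nil_append]; rw [hlen] at hfuel; omega)
        (if acc.length ≠ 0 then
           out ++ [[("expression", label), ("text", some (PySem.Str.join " " acc))]]
         else out)
        (some (String.ofList (PySem.List.slice t.toList (some 1) (some (-1)))))
      simp only [List.nil_append] at hrec
      rw [hrec]
      simp only [pvSegAcc, hm, if_pos]
      by_cases h : acc = []
      · simp [h]
      · have : acc.length ≠ 0 := by simpa [List.length_eq_zero_iff] using h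
        simp [h, this, List.append_assoc]
    · have hm' : pvIsMarker el t = false := by simpa using hm
      have hl : acc ++ t :: r = (acc ++ [t]) ++ r := by simp
      rw [hl]
      rw [ih (acc ++ [t])
        (by intro u hu; rcases List.mem_append.mp hu with h | h
            · exact hacc u h
            · simpa [List.mem_singleton.mp h] using hm')
        fuel (by rw [← hl]; exact hfuel) out label]
      simp [pvSegAcc, hm']

-- A's loop + closing flush equals the accumulator form
lemma loopA_seg (el : List String) :
    ∀ (rest : List String), (∀ t ∈ rest, Ptok t.toList) →
    ∀ (exprs : List (List (String × Option String))) (curE : Option String)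
      (toks : List String), (∀ t ∈ toks, Ptok t.toList) →
    pvFlush (pvLoopA el rest (exprs, curE, joinT toks)) = exprs ++ pvSegAcc el rest curE toks := by
  intro rest
  induction rest with
  | nil =>
    intro _ exprs curE toks htoks
    simp only [pvLoopA, pvFlush, pvSegAcc]
    by_cases h : toks = []
    · subst h
      simp only [joinT_nil, strip_nil, ne_eq, not_true_eq_false, if_false]
      simp
    · have hs := strip_joinT toks htoks
      have hne : interc toks ≠ [] := interc_ne_nil toks h htoks
      rw [hs]
      simp only [hne, ne_eq, not_false_iff, if_pos, h, str_join_eq]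
      rcases curE with _ | s
      · simp
      · by_cases hs' : s = ""
        · subst hs'; simp
        · simp [hs']
  | cons t r ih =>
    intro hr exprs curE toks htoks
    have hr' : ∀ u ∈ r, Ptok u.toList := fun u hu => hr u (by simp [hu])
    by_cases hb : (PySem.Str.startswith t "(" && PySem.Str.endswith t ")") = true
    · by_cases he : (String.ofList (PySem.List.slice t.toList (some 1) (some (-1)))) ∈ el
      · have hm : pvIsMarker el t = true := by
          simp only [pvIsMarker, hb, Bool.true_and, decide_eq_true_eq]; exact he
        by_cases htk : toks = []
        · subst htk
          simp only [pvLoopA, hb, if_pos, joinT_nil, strip_nil, ne_eq,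
            not_true_eq_false, if_false, he, if_true]
          have hrec := ih hr' exprs
            (some (String.ofList (PySem.List.slice t.toList (some 1) (some (-1))))) [] (by simp)
          rw [joinT_nil] at hrec
          rw [hrec]
          simp [pvSegAcc, hm]
        · have hs := strip_joinT toks htoks
          have hne : interc toks ≠ [] := interc_ne_nil toks htk htoks
          simp only [pvLoopA, hb, if_pos, he, hs, hne, ne_eq, not_false_iff]
          have hrec := ih hr'
            (exprs ++ [[("expression", curE), ("text", some (String.ofList (interc toks)))]])
            (some (String.ofList (PySem.List.slice t.toList (some 1) (some (-1))))) [] (by simp)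
          rw [joinT_nil] at hrec
          rw [hrec]
          simp [pvSegAcc, hm, htk, str_join_eq, List.append_assoc]
      · have hm : pvIsMarker el t = false := by
          simp only [pvIsMarker]
          rw [decide_eq_false he]
          simp
        have htoks' : ∀ u ∈ toks ++ [t], Ptok u.toList := by
          intro u hu
          rcases List.mem_append.mp hu with h | h
          · exact htoks u h
          · simpa [List.mem_singleton.mp h] using hr t (by simp)
        have hrec := ih hr' exprs curE (toks ++ [t]) htoks'
        rw [joinT_append, ← List.append_assoc] at hrec
        simp only [pvLoopA, hb, if_pos, he, if_false]
        rw [hrec]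
        simp [pvSegAcc, hm]
    · have hb' : (PySem.Str.startswith t "(" && PySem.Str.endswith t ")") = false := by
        simpa using hb
      have hm : pvIsMarker el t = false := by
        simp only [pvIsMarker, hb', Bool.false_and]
      have htoks' : ∀ u ∈ toks ++ [t], Ptok u.toList := by
        intro u hu
        rcases List.mem_append.mp hu with h | h
        · exact htoks u h
        · simpa [List.mem_singleton.mp h] using hr t (by simp)
      have hrec := ih hr' exprs curE (toks ++ [t]) htoks'
      rw [joinT_append, ← List.append_assoc] at hrec
      simp only [pvLoopA, hb', Bool.false_eq_true, if_false, ite_self]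
      rw [hrec]
      simp [pvSegAcc, hm]

-- ===== VERDICT (by name: the statement is the Claim_ definition above) =====
theorem extract_expressions_spec : Claim_equal_extract_expressions := by
  intro text el _hdom
  unfold Spec_extract_expressions
  have hwf : ∀ t ∈ PySem.Str.split₀ text, Ptok t.toList := by
    intro t ht
    rcases List.mem_map.mp (by simpa [PySem.Str.split₀] using ht) with ⟨cs, hcs, rfl⟩
    simpa [String.toList_ofList] using split0_wf _ cs hcs
  have hA := loopA_seg el (PySem.Str.split₀ text) hwf [] none [] (by simp)
  rw [joinT_nil] at hA
  have hB := segF_eq_segAcc el (PySem.Str.split₀ text) [] (by simp)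
    ((PySem.Str.split₀ text).length + 1) (by simp) [] none
  simp only [List.nil_append] at hA hB
  show extract_expressions text el = extract_expressions_alt text el
  unfold extract_expressions extract_expressions_alt
  rw [hB]
  show pvFlush (pvLoopA el (PySem.Str.split₀ text) ([], none, [])) = _
  exact hA
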